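-- pv_equiv track=rewrite | github.com/ApricityZ/AlgorithmLearning | class030/code06_one_kind_num_less_m_times.py | find
-- ===== SOURCE A (Python) =====
-- def find(nums: list[int], m: int) -> int:
--     cnts = [0] * 32
--     for bit_idx in range(32):
--         for num in nums:
--             if (num >> bit_idx) & 1:
--                 cnts[bit_idx] += 1
--
--     ans = 0
--     for i, time in enumerate(cnts):
--         if time % m != 0:
--             ans |= (1 << i)
--
--     # --- 问题修正 ---
--     # LeetCode的题目限制数字是32位有符号整数。
--     # 如果ans的第31位是1 (ans >= 2**31)，说明它在32位系统中是一个负数。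
--     # 需要将其从无符号表示转换为Python中的负数表示。
--     if ans >= (1 << 31):
--         ans -= (1 << 32)
--
--     return ans
-- ===== SOURCE B (Python) =====
-- def find(nums: list[int], m: int) -> int:
--     # Inverted traversal: one pass over nums, popping only each number's set
--     # bits (v & (v-1) clears the lowest set bit) instead of scanning all 32
--     # bit positions for every number.
--     cnts = [0] * 32
--     for num in nums:
--         v = num % 0x100000000        # low 32 bits (two's complement)
--         while v:
--             v1 = v & (v - 1)         # v with its lowest set bit cleared
--             cnts[(v ^ v1).bit_length() - 1] += 1   # index of that bit
--             v = v1
--     ans = 0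
--     for i in range(32):
--         if cnts[i] % m != 0:
--             ans |= 1 << i
--     if ans >= 1 << 31:
--         ans -= 1 << 32
--     return ans
-- ===== Notes on version B (the rewrite author's own statement) =====
-- stated objective: alternative
-- what changed: Inverts the loop nest and replaces the fixed scan of all 32 bit positions per number by popping only each number's set bits with v & (v-1), indexing the counter by the popped bit's position; the 32-bit mask and sign fixup stay verbatim.
import Mathlib
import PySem

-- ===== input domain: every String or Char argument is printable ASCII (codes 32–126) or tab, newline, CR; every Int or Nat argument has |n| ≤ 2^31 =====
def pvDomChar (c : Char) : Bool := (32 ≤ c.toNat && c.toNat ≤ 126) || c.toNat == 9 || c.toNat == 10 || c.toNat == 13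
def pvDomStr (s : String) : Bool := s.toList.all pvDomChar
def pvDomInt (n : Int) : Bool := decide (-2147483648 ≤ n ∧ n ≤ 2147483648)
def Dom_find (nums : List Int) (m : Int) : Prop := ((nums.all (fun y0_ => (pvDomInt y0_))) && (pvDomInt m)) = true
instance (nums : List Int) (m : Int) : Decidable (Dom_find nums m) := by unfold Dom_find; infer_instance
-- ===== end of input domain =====

-- B builds the per-bit counters by popping each number's set bits (v & (v-1))
-- in one pass over nums instead of A's scan of all 32 bit positions per number.

-- ===== PORT A =====
-- `(num >> bit_idx) & 1` is ported with core `>>>` and PySem.Int.band (both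
-- Python-exact, also on negatives); the truthiness test is `/= 0`.
-- `cnts[bit_idx] += 1` is List.modify (bit_idx is always in range 0..31).
def find (nums : List Int) (m : Int) : Int :=
  let cnts : List Int := List.replicate 32 0
  let cnts := (PySem.List.pyRange 0 32 1).foldl (fun (cnts : List Int) (bitIdx : Int) =>
      nums.foldl (fun (cnts : List Int) (num : Int) =>
        if PySem.Int.band (num >>> bitIdx.toNat) 1 ≠ 0 then cnts.modify bitIdx.toNat (· + 1)
        else cnts) cnts) cnts
  let ans := (PySem.List.enumerate cnts).foldl (fun ans it =>
      if PySem.Int.mod it.2 m ≠ 0 then PySem.Int.bor ans (1 <<< it.1.toNat) else ans) 0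
  if ans ≥ (1 <<< 31 : Int) then ans - (1 <<< 32) else ans

-- ===== PORT B =====
-- the while-loop of Source B; v lives in Nat since v = num % 2**32 ≥ 0.
-- `(v ^ v1).bit_length() - 1` is Nat.log2 (v ^^^ v1): for x > 0,
-- x.bit_length() - 1 = log2 x, and v ^ v1 > 0 whenever v ≠ 0.
-- `cnts[...] += 1` is List.modify (the index is always < 32 since v < 2**32).
def popBits (v : Nat) (cnts : List Int) : List Int :=
  if h : v = 0 then cnts
  else
    let v1 := v &&& (v - 1)
    popBits v1 (cnts.modify (Nat.log2 (v ^^^ v1)) (· + 1))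
termination_by v
decreasing_by exact Nat.lt_of_le_of_lt Nat.and_le_right (Nat.pred_lt h)

-- `num % 0x100000000` is PySem.Int.mod (result is ≥ 0, taken into Nat)
def find_alt (nums : List Int) (m : Int) : Int :=
  let cnts := nums.foldl (fun (cnts : List Int) (num : Int) =>
      popBits (PySem.Int.mod num 4294967296).toNat cnts) (List.replicate 32 0)
  let ans := (PySem.List.pyRange 0 32 1).foldl (fun ans i =>
      if PySem.Int.mod (PySem.List.pyGetD cnts i 0) m ≠ 0 then PySem.Int.bor ans (1 <<< i.toNat)
      else ans) 0
  if ans ≥ (1 <<< 31 : Int) then ans - (1 <<< 32) else ans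

-- ===== PRECONDITION & SPEC =====
-- Pre_ excludes only m = 0, where A (and B alike) raise ZeroDivisionError on `% m`.
def Pre_find (nums : List Int) (m : Int) : Prop := m ≠ 0
instance (nums : List Int) (m : Int) : Decidable (Pre_find nums m) := by
  unfold Pre_find; infer_instance

def pvWitness_find : List Int × Int := ([3, -7, 3, 5, 3, -7, 5], 3)

def Spec_find (nums : List Int) (m : Int) (out : Int) : Prop := out = find_alt nums m
instance (nums : List Int) (m : Int) (out : Int) : Decidable (Spec_find nums m out) := by
  unfold Spec_find; infer_instance

-- ===== CLAIM (what is proved, stated in full; the proofs are below) =====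
def Claim_equal_find : Prop := ∀ (nums : List Int) (m : Int), Dom_find nums m → Pre_find nums m → Spec_find nums m (find nums m)

-- ===== LEMMAS AND PROOFS =====

-- the 32-bit two's-complement value whose bits a number contributes
def pvMask (num : Int) : Nat := (PySem.Int.mod num 4294967296).toNat

-- v &&& (v-1) clears exactly the lowest set bit; the xor with v is that bit
lemma pv_lowbit (v : Nat) (hv : v ≠ 0) :
    ∃ k, v ^^^ (v &&& (v - 1)) = 2 ^ k ∧ v.testBit k = true ∧
      ∀ j, (v &&& (v - 1)).testBit j = (v.testBit j && !(j == k)) := by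
  induction v using Nat.strong_induction_on with
  | _ v ih =>
  by_cases h2 : v % 2 = 1
  · have h3 : (v - 1) % 2 = 0 := by omega
    have e1 : (v - 1) / 2 = v / 2 := by omega
    refine ⟨0, ?_, by simp [Nat.testBit_zero, h2], ?_⟩
    · apply Nat.eq_of_testBit_eq; intro j
      simp only [Nat.testBit_xor, Nat.testBit_land, Nat.testBit_two_pow]
      cases j with
      | zero => simp [Nat.testBit_zero, h2, h3]
      | succ j => simp [Nat.testBit_succ, e1]
    · intro j
      simp only [Nat.testBit_land]
      cases j with
      | zero => simp [Nat.testBit_zero, h2, h3]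
      | succ j => simp [Nat.testBit_succ, e1]
  · have h2' : v % 2 = 0 := by omega
    have hv2 : v / 2 ≠ 0 := by omega
    obtain ⟨k, hx, ht, hb⟩ := ih (v / 2) (by omega) hv2
    have e1 : (v - 1) / 2 = v / 2 - 1 := by omega
    refine ⟨k + 1, ?_, by simp [Nat.testBit_succ, ht], ?_⟩
    · apply Nat.eq_of_testBit_eq; intro j
      have hxj := congrArg (fun n => n.testBit j.pred) hx
      simp only [Nat.testBit_xor, Nat.testBit_land, Nat.testBit_two_pow] at hxj ⊢
      cases j with
      | zero => simp [Nat.testBit_zero, h2']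
      | succ j => simpa [Nat.testBit_succ, e1] using hxj
    · intro j
      have hbj := hb j.pred
      simp only [Nat.testBit_land] at hbj ⊢
      cases j with
      | zero => simp [Nat.testBit_zero, h2']
      | succ j => simpa [Nat.testBit_succ, e1] using hbj

-- popBits preserves the length
lemma pv_popBits_len (v : Nat) : ∀ c : List Int, (popBits v c).length = c.length := by
  induction v using Nat.strong_induction_on with
  | _ v ih =>
  intro c
  rw [popBits]
  split
  · rfl
  · rename_i h
    dsimp only
    have hlt : v &&& (v - 1) < v := Nat.lt_of_le_of_lt Nat.and_le_right (by omega)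
    rw [ih _ hlt]
    simp


-- pointwise effect of popBits: +1 on every set bit of v
lemma pv_popBits_getD (v : Nat) : ∀ c : List Int, c.length = 32 → v < 2 ^ 32 →
    ∀ j, j < 32 → (popBits v c).getD j 0 = c.getD j 0 + (if v.testBit j then 1 else 0) := by
  induction v using Nat.strong_induction_on with
  | _ v ih =>
  intro c hc hv32 j hj
  rw [popBits]
  split
  · rename_i h; subst h; simp
  · rename_i h
    obtain ⟨k, hx, ht, hb⟩ := pv_lowbit v h
    have hk32 : k < 32 := by
      by_contra hk
      have : v.testBit k = false :=
        Nat.testBit_lt_two_pow (lt_of_lt_of_le hv32 (Nat.pow_le_pow_right (by omega) (by omega)))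
      simp [this] at ht
    have hklog : Nat.log2 (v ^^^ (v &&& (v - 1))) = k := by rw [hx, Nat.log2_two_pow]
    have hlt : v &&& (v - 1) < v := Nat.lt_of_le_of_lt Nat.and_le_right (by omega)
    have h32' : v &&& (v - 1) < 2 ^ 32 := lt_trans hlt hv32
    have hlen' : (c.modify k (· + 1)).length = 32 := by simp [hc]
    dsimp only
    simp only [hklog]
    rw [ih _ hlt _ hlen' h32' j hj]
    have hgd : (c.modify k (· + 1)).getD j 0 = c.getD j 0 + (if k = j then 1 else 0) := by
      simp only [List.getD_eq_getElem?_getD, List.getElem?_modify]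
      have hjc : j < c.length := by omega
      rw [List.getElem?_eq_getElem hjc]
      split <;> simp
    rw [hgd, hb j]
    by_cases hkj : k = j
    · subst hkj
      simp [ht]
    · have hbe : (j == k) = false := by simp [Ne.symm hkj]
      simp [hkj, hbe]

-- A's bit test agrees with testBit on the masked value
lemma pv_bit_cond (num : Int) (j : Nat) (hj : j < 32) :
    (PySem.Int.band (num >>> j) 1 ≠ 0) ↔ (pvMask num).testBit j = true := by
  have hpos : (0:Int) < 4294967296 := by norm_num
  have hr := PySem.Int.mod_eq_emod_of_pos (a := num) hpos
  have hrnn : 0 ≤ PySem.Int.mod num 4294967296 := PySem.Int.mod_nonneg num hpos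
  set r : Int := PySem.Int.mod num 4294967296 with hrdef
  have hmask : (pvMask num : Int) = r := by
    simp [pvMask]
    omega
  -- num = r + (2^(32-j) * (num / 2^32)) * 2^j
  have hsplit : num = r + (2 ^ (32 - j) * (num / 4294967296)) * 2 ^ j := by
    have h32 : (2:Int) ^ (32 - j) * 2 ^ j = 4294967296 := by
      have he : (32 - j) + j = 32 := by omega
      rw [← pow_add, he]; norm_num
    rw [mul_right_comm, h32, hr, Int.emod_def]; ring
  rw [PySem.Int.band_one, PySem.Int.mod_eq_emod_of_pos (by norm_num : (0:Int) < 2),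
    Int.shiftRight_eq_div_pow]
  rw [Nat.testBit_eq_decide_div_mod_eq]
  have hdiv : num / (2:Int) ^ j = r / 2 ^ j + 2 ^ (32 - j) * (num / 4294967296) := by
    conv_lhs => rw [hsplit]
    rw [Int.add_mul_ediv_right _ _ (by positivity : ((2:Int) ^ j) ≠ 0)]
  have heven : (2:Int) ∣ 2 ^ (32 - j) := dvd_pow_self 2 (by omega)
  obtain ⟨t, ht⟩ := heven
  have hmod2 : num / (2:Int) ^ j % 2 = r / 2 ^ j % 2 := by
    rw [hdiv, ht, mul_assoc]
    exact Int.add_mul_emod_self_left _ _ _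
  have hcast : r / (2:Int) ^ j % 2 = ((pvMask num / 2 ^ j % 2 : Nat) : Int) := by
    rw [← hmask]; push_cast; rfl
  push_cast
  rw [hmod2, hcast]
  constructor
  · intro h
    have : pvMask num / 2 ^ j % 2 = 1 := by omega
    simp [this]
  · intro h
    have : pvMask num / 2 ^ j % 2 = 1 := by simpa using h
    omega


lemma pv_foldA_inner (P : Int → Prop) [DecidablePred P] (i : Nat) (nums : List Int) : ∀ (c : List Int),
    (nums.foldl (fun cnts num => if P num then cnts.modify i (· + 1) else cnts) c).length = c.length ∧
    ∀ j, j < c.length →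
      (nums.foldl (fun cnts num => if P num then cnts.modify i (· + 1) else cnts) c).getD j 0 =
      c.getD j 0 + (if i = j then (nums.countP (fun num => decide (P num)) : Int) else 0) := by
  induction nums with
  | nil => intro c; simp
  | cons num t ih =>
    intro c
    simp only [List.foldl_cons]
    by_cases hP : P num
    · simp only [if_pos hP]
      obtain ⟨ihl, ihd⟩ := ih (c.modify i (· + 1))
      refine ⟨by simp [ihl], ?_⟩
      intro j hj
      rw [ihd j (by simp [hj])]
      have hgd : (c.modify i (· + 1)).getD j 0 = c.getD j 0 + (if i = j then 1 else 0) := by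
        simp only [List.getD_eq_getElem?_getD, List.getElem?_modify]
        rw [List.getElem?_eq_getElem hj]
        split <;> simp
      rw [hgd, List.countP_cons]
      by_cases hij : i = j
      · simp [hij, hP]; ring
      · simp [hij]
    · simp only [if_neg hP]
      obtain ⟨ihl, ihd⟩ := ih c
      refine ⟨ihl, ?_⟩
      intro j hj
      rw [ihd j hj, List.countP_cons]
      simp [hP]

lemma pv_foldA_outer (nums : List Int) (is : List Int) : ∀ (c : List Int),
    (is.foldl (fun (cnts : List Int) (bitIdx : Int) =>
      nums.foldl (fun (cnts : List Int) (num : Int) =>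
        if PySem.Int.band (num >>> bitIdx.toNat) 1 ≠ 0 then cnts.modify bitIdx.toNat (· + 1)
        else cnts) cnts) c).length = c.length ∧
    ∀ j, j < c.length →
      (is.foldl (fun (cnts : List Int) (bitIdx : Int) =>
        nums.foldl (fun (cnts : List Int) (num : Int) =>
          if PySem.Int.band (num >>> bitIdx.toNat) 1 ≠ 0 then cnts.modify bitIdx.toNat (· + 1)
          else cnts) cnts) c).getD j 0 =
      c.getD j 0 + (is.countP (fun i => i.toNat == j) : Int) *
        (nums.countP (fun num : Int => decide (PySem.Int.band (num >>> j) 1 ≠ 0)) : Int) := by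
  induction is with
  | nil => intro c; simp
  | cons i0 t ih =>
    intro c
    simp only [List.foldl_cons]
    obtain ⟨hl1, hd1⟩ := pv_foldA_inner
      (fun num => PySem.Int.band (num >>> i0.toNat) 1 ≠ 0) i0.toNat nums c
    obtain ⟨ihl, ihd⟩ := ih (nums.foldl (fun (cnts : List Int) (num : Int) =>
        if PySem.Int.band (num >>> i0.toNat) 1 ≠ 0 then cnts.modify i0.toNat (· + 1)
        else cnts) c)
    refine ⟨by rw [ihl, hl1], ?_⟩
    intro j hj
    rw [ihd j (by rw [hl1]; exact hj), hd1 j hj, List.countP_cons]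
    by_cases hij : i0.toNat = j
    · subst hij
      simp only [beq_self_eq_true, if_true]
      push_cast
      ring
    · have : (i0.toNat == j) = false := by simp [hij]
      simp [hij, this]

lemma pv_foldB (nums : List Int) : ∀ (c : List Int), c.length = 32 →
    (nums.foldl (fun (cnts : List Int) (num : Int) =>
      popBits (PySem.Int.mod num 4294967296).toNat cnts) c).length = 32 ∧
    ∀ j, j < 32 →
      (nums.foldl (fun (cnts : List Int) (num : Int) =>
        popBits (PySem.Int.mod num 4294967296).toNat cnts) c).getD j 0 =
      c.getD j 0 + (nums.countP (fun num => (pvMask num).testBit j) : Int) := by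
  induction nums with
  | nil => intro c hc; simpa using hc
  | cons num t ih =>
    intro c hc
    have hm : (PySem.Int.mod num 4294967296).toNat < 2 ^ 32 := by
      have h1 := PySem.Int.mod_nonneg num (by norm_num : (0:Int) < 4294967296)
      have h2 := PySem.Int.mod_lt num (by norm_num : (0:Int) < 4294967296)
      omega
    have hlen1 : (popBits (PySem.Int.mod num 4294967296).toNat c).length = 32 := by
      rw [pv_popBits_len]; exact hc
    obtain ⟨ihl, ihd⟩ := ih (popBits (PySem.Int.mod num 4294967296).toNat c) hlen1
    simp only [List.foldl_cons]
    refine ⟨ihl, ?_⟩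
    intro j hj
    rw [ihd j hj, pv_popBits_getD _ c hc hm j hj, List.countP_cons]
    have : (pvMask num).testBit j = (PySem.Int.mod num 4294967296).toNat.testBit j := rfl
    rw [← this]
    by_cases hb : (pvMask num).testBit j
    · simp [hb]; ring
    · simp [hb]


lemma pv_range_count (j : Nat) (hj : j < 32) :
    (PySem.List.pyRange 0 32 1).countP (fun i => i.toNat == j) = 1 := by
  interval_cases j <;> decide

-- the two counter lists coincide
lemma pv_cnts_eq (nums : List Int) :
    ((PySem.List.pyRange 0 32 1).foldl (fun (cnts : List Int) (bitIdx : Int) =>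
      nums.foldl (fun (cnts : List Int) (num : Int) =>
        if PySem.Int.band (num >>> bitIdx.toNat) 1 ≠ 0 then cnts.modify bitIdx.toNat (· + 1)
        else cnts) cnts) (List.replicate 32 0)) =
    (nums.foldl (fun (cnts : List Int) (num : Int) =>
      popBits (PySem.Int.mod num 4294967296).toNat cnts) (List.replicate 32 0)) := by
  obtain ⟨hal, had⟩ := pv_foldA_outer nums (PySem.List.pyRange 0 32 1) (List.replicate 32 0)
  obtain ⟨hbl, hbd⟩ := pv_foldB nums (List.replicate 32 0) (by simp)
  apply List.ext_getElem (by rw [hal, hbl]; simp)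
  intro j hj1 hj2
  have hj : j < 32 := by omega
  have hga : ∀ (l : List Int) (hl : j < l.length), l[j] = l.getD j 0 := by
    intro l hl
    rw [List.getD_eq_getElem?_getD, List.getElem?_eq_getElem hl]
    rfl
  rw [hga _ hj1, hga _ hj2, had j (by simpa using hj), hbd j hj,
    pv_range_count j hj]
  have hcnt : nums.countP (fun num : Int => decide (PySem.Int.band (num >>> j) 1 ≠ 0)) =
      nums.countP (fun num => (pvMask num).testBit j) := by
    apply List.countP_congr
    intro num _
    simpa using pv_bit_cond num j hj
  rw [hcnt]
  push_cast
  ring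

-- ===== VERDICT (by name: the statement is the Claim_ definition above) =====
theorem find_spec : Claim_equal_find := by
  intro nums m _ _
  unfold Spec_find find find_alt
  dsimp only
  rw [pv_cnts_eq]
  obtain ⟨hbl, _⟩ := pv_foldB nums (List.replicate 32 0) (by simp)
  rw [PySem.List.enumerate_eq_map_pyRange _ (0 : Int), List.foldl_map]
  have hlen : PySem.List.len (nums.foldl (fun (cnts : List Int) (num : Int) =>
      popBits (PySem.Int.mod num 4294967296).toNat cnts) (List.replicate 32 0)) = 32 := by
    simp only [PySem.List.len]
    exact_mod_cast hbl
  rw [hlen]
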